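-- pv_equiv track=rewrite | github.com/suresh-vuppala/interview-ignite-lab | src/data/courses/dsa/two-pointers-sliding-window/sliding-window-fixed-size/distinct-elements-window/code/python/distinct_elements_window.py | distinct_elements_brute
-- ===== SOURCE A (Python) =====
-- def distinct_elements_brute(arr, k):
--     n = len(arr)
--     result = []
--
--     # For each window
--     for i in range(n - k + 1):
--         distinct = set()
--         # Add all elements in window to set
--         for j in range(i, i + k):
--             distinct.add(arr[j])
--         result.append(len(distinct))
--
--     return result
-- ===== SOURCE B (Python) =====
-- def distinct_elements_brute(arr, k):
--     n = len(arr)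
--     m = n - k + 1  # number of windows
--     if m <= 0:
--         return []
--     if k <= 0:
--         return [0] * m  # empty windows have no elements
--     freq = {}
--     result = []
--     for j in range(n):
--         a = arr[j]
--         freq[a] = freq.get(a, 0) + 1
--         if j >= k:
--             x = arr[j - k]
--             if freq[x] == 1:
--                 del freq[x]
--             else:
--                 freq[x] -= 1
--         if j >= k - 1:
--             result.append(len(freq))
--     return result
-- ===== Notes on version B (the rewrite author's own statement) =====
-- stated objective: faster
-- what changed: Replaces the per-window rebuild of a distinct set (O(n*k)) by a single sliding-window pass that maintains a frequency dict incrementally, appending the dict's size as each window completes.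
import Mathlib
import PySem

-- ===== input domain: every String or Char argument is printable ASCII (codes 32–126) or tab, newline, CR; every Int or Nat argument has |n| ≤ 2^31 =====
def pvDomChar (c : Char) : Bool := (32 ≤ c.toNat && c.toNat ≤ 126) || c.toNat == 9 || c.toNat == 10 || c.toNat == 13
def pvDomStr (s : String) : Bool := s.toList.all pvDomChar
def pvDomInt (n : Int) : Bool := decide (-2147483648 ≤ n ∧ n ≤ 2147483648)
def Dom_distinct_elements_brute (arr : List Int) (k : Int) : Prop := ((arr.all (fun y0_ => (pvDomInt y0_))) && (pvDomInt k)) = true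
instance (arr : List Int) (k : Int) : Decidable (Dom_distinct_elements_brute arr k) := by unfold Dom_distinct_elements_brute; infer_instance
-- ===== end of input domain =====

-- B replaces A's per-window set rebuild by one sliding-window pass with an incrementally
-- maintained frequency dict (measured faster; asymptotically O(n) vs O(n*k)); return values agree on all inputs.

-- ===== PORT A =====
def distinct_elements_brute (arr : List Int) (k : Int) : List Int :=
  let n : Int := arr.length
  (PySem.List.pyRange 0 (n - k + 1) 1).foldl
    (fun result i =>
      let distinct := (PySem.List.pyRange i (i + k) 1).foldl
        (fun distinct j => PySem.Set.add distinct (PySem.List.pyGetD arr j 0)) ([] : List Int)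
      result ++ [(distinct.length : Int)])
    []

-- ===== PORT B =====
-- loop body of Source B's single pass (j = current index; state = (freq, result))
def dewStep (arr : List Int) (k : Int) (st : PySem.Dict Int Int × List Int) (j : Int) :
    PySem.Dict Int Int × List Int :=
  let a := PySem.List.pyGetD arr j 0
  let freq := st.1.insert a (st.1.getD a 0 + 1)
  let freq :=
    if k ≤ j then
      let x := PySem.List.pyGetD arr (j - k) 0
      if freq.getD x 0 = 1 then freq.erase x
      else freq.insert x (freq.getD x 0 - 1)
    else freq
  if k - 1 ≤ j then (freq, st.2 ++ [(PySem.Dict.size freq : Int)]) else (freq, st.2)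

def distinct_elements_brute_alt (arr : List Int) (k : Int) : List Int :=
  let n : Int := arr.length
  let m := n - k + 1
  if m ≤ 0 then []
  else if k ≤ 0 then List.replicate m.toNat 0
  else ((PySem.List.pyRange 0 n 1).foldl (dewStep arr k) (PySem.Dict.empty, [])).2

-- ===== PRECONDITION & SPEC =====
def Spec_distinct_elements_brute (arr : List Int) (k : Int) (out : List Int) : Prop := out = distinct_elements_brute_alt arr k
instance (arr : List Int) (k : Int) (out : List Int) : Decidable (Spec_distinct_elements_brute arr k out) := by unfold Spec_distinct_elements_brute; infer_instance

-- ===== CLAIM (what is proved, stated in full; the proofs are below) =====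
def Claim_equal_distinct_elements_brute : Prop := ∀ (arr : List Int) (k : Int), Dom_distinct_elements_brute arr k → Spec_distinct_elements_brute arr k (distinct_elements_brute arr k)

-- ===== LEMMAS AND PROOFS =====

-- the distinct count of the window of length kN starting at index i
def wcnt (arr : List Int) (kN i : Nat) : Int :=
  ((PySem.Set.ofList ((arr.drop i).take kN)).length : Int)

-- freq is exactly the counter of the current window w
def InvD (w : List Int) (d : PySem.Dict Int Int) : Prop :=
  d.keys.Nodup ∧ ∀ x : Int, d.get? x = if w.count x = 0 then none else some ((w.count x : Int))

lemma dict_get?_erase (d : PySem.Dict Int Int) (k x : Int) :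
    (d.erase k).get? x = if x = k then none else d.get? x := by
  obtain ⟨its⟩ := d
  simp only [PySem.Dict.erase, PySem.Dict.get?]
  induction its with
  | nil => by_cases hxk : x = k <;> simp [hxk]
  | cons p t ih =>
    by_cases hpk : p.1 = k
    · by_cases hxk : x = k
      · simpa [List.filter_cons, List.find?_cons, hpk, hxk] using ih
      · have hkx : ¬ (k = x) := fun h => hxk h.symm
        simpa [List.filter_cons, List.find?_cons, hpk, hxk, hkx] using ih
    · by_cases hpx : p.1 = x
      · have hxk : ¬ (x = k) := by rw [← hpx]; exact hpk
        simp [List.find?_cons, hpk, hpx, hxk]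
      · by_cases hxk : x = k <;> simpa [List.filter_cons, List.find?_cons, hpk, hpx, hxk] using ih

lemma dict_nodup_keys_erase (d : PySem.Dict Int Int) (k : Int) (h : d.keys.Nodup) :
    (d.erase k).keys.Nodup := by
  obtain ⟨its⟩ := d
  simp only [PySem.Dict.erase, PySem.Dict.keys] at *
  exact h.sublist ((List.filter_sublist (l := its)).map _)

lemma size_of_inv (w : List Int) (d : PySem.Dict Int Int) (h : InvD w d) :
    d.size = (PySem.Set.ofList w).length := by
  obtain ⟨hnd, hget⟩ := h
  have hmem : ∀ x, x ∈ d.keys ↔ x ∈ PySem.Set.ofList w := by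
    intro x
    rw [PySem.Set.mem_ofList, ← not_iff_not,
      ← PySem.Dict.get?_eq_none_iff_not_mem_keys, hget x, ← List.count_eq_zero]
    by_cases hc : w.count x = 0 <;> simp [hc]
  have hperm := (List.perm_ext_iff_of_nodup hnd (PySem.Set.nodup_ofList w)).mpr hmem
  have hl := hperm.length_eq
  simpa [PySem.Dict.size, PySem.Dict.keys] using hl

lemma getD_of_inv (w : List Int) (d : PySem.Dict Int Int) (h : InvD w d) (x : Int) :
    d.getD x 0 = (w.count x : Int) := by
  rw [PySem.Dict.getD_eq_get?_getD, h.2 x]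
  by_cases hc : w.count x = 0 <;> simp [hc]

lemma inv_insert_add (w : List Int) (d : PySem.Dict Int Int) (a : Int) (h : InvD w d) :
    InvD (w ++ [a]) (d.insert a (d.getD a 0 + 1)) := by
  obtain ⟨hnd, hget⟩ := h
  refine ⟨PySem.Dict.nodup_keys_insert _ _ _ hnd, ?_⟩
  intro x
  have hda := getD_of_inv w d ⟨hnd, hget⟩ a
  rw [PySem.Dict.get?_insert]
  by_cases hxa : x = a
  · subst hxa
    rw [hda]
    have h1 : (w ++ [x]).count x = w.count x + 1 := by simp
    rw [h1]
    simp
  · rw [if_neg hxa, hget x]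
    have hax : ¬ a = x := fun hh => hxa hh.symm
    have h1 : (w ++ [a]).count x = w.count x := by simp [hax]
    rw [h1]

lemma inv_remove (w : List Int) (d : PySem.Dict Int Int) (x : Int) (h : InvD (x :: w) d) :
    InvD w (if d.getD x 0 = 1 then d.erase x else d.insert x (d.getD x 0 - 1)) := by
  obtain ⟨hnd, hget⟩ := h
  have hdx := getD_of_inv _ _ ⟨hnd, hget⟩ x
  have hcx : (x :: w).count x = w.count x + 1 := by simp
  by_cases h1 : d.getD x 0 = 1
  · rw [if_pos h1]
    have hw0 : w.count x = 0 := by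
      rw [hdx, hcx] at h1
      exact_mod_cast by omega
    refine ⟨dict_nodup_keys_erase d x hnd, ?_⟩
    intro y
    rw [dict_get?_erase]
    by_cases hyx : y = x
    · subst hyx
      simp [hw0]
    · have hxy : ¬ x = y := fun hh => hyx hh.symm
      rw [if_neg hyx, hget y]
      have : (x :: w).count y = w.count y := by simp [hxy]
      rw [this]
  · rw [if_neg h1]
    have hwpos : w.count x ≠ 0 := by
      intro h0
      apply h1
      rw [hdx, hcx, h0]
      simp
    refine ⟨PySem.Dict.nodup_keys_insert _ _ _ hnd, ?_⟩
    intro y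
    rw [PySem.Dict.get?_insert]
    by_cases hyx : y = x
    · subst hyx
      rw [if_pos rfl, if_neg hwpos, hdx, hcx]
      push_cast
      ring_nf
    · have hxy : ¬ x = y := fun hh => hyx hh.symm
      rw [if_neg hyx, hget y]
      have : (x :: w).count y = w.count y := by simp [hxy]
      rw [this]

-- the A-side inner window, read off by indices
lemma window_map (arr : List Int) (kN i : Nat) (h : i + kN ≤ arr.length) :
    (PySem.List.pyRange (i : Int) ((i : Int) + (kN : Int)) 1).map
      (fun j => PySem.List.pyGetD arr j 0) = (arr.drop i).take kN := by
  rw [PySem.List.pyRange_one]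
  have ht : ((i : Int) + (kN : Int) - (i : Int)).toNat = kN := by omega
  rw [ht, List.map_map]
  apply List.ext_getElem
  · simp
    omega
  · intro t h1 h2
    simp only [List.getElem_map, List.getElem_range, Function.comp]
    rw [PySem.List.pyGetD_eq_getElem arr 0 (by positivity) (by simp at h1; omega)]
    have hidx : ((i : Int) + (t : Int)).toNat = i + t := by omega
    simp only [List.getElem_take, List.getElem_drop, hidx]

lemma dewStep_spec (arr : List Int) (kN p : Nat) (h1 : 1 ≤ kN) (hp : p < arr.length)
    (st : PySem.Dict Int Int × List Int)
    (hinv : InvD ((arr.take p).drop (p - kN)) st.1)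
    (hres : st.2 = (List.range (p + 1 - kN)).map (wcnt arr kN)) :
    InvD ((arr.take (p + 1)).drop (p + 1 - kN)) ((dewStep arr (kN : Int) st (p : Int)).1)
    ∧ (dewStep arr (kN : Int) st (p : Int)).2
      = (List.range (p + 2 - kN)).map (wcnt arr kN) := by
  have ha : PySem.List.pyGetD arr (p : Int) 0 = arr[p] := by
    rw [PySem.List.pyGetD_natCast, List.getD_eq_getElem _ _ hp]
  have htake : arr.take (p + 1) = arr.take p ++ [arr[p]] := by
    rw [List.take_succ]
    simp [List.getElem?_eq_getElem hp]
  by_cases hk : kN ≤ p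
  · -- window slides: its head x = arr[p - kN] leaves, arr[p] enters
    have hlen : p - kN < (arr.take p).length := by
      simp [List.length_take]
      omega
    have hhead : (arr.take p)[p - kN]'hlen = arr[p - kN]'(by omega) := List.getElem_take
    have hw : (arr.take p).drop (p - kN)
        = arr[p - kN]'(by omega) :: (arr.take p).drop (p - kN + 1) := by
      rw [List.drop_eq_getElem_cons hlen, hhead]
    have hwin1 : InvD (((arr.take p).drop (p - kN)) ++ [arr[p]])
        (st.1.insert arr[p] (st.1.getD arr[p] 0 + 1)) := inv_insert_add _ _ _ hinv
    rw [hw] at hwin1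
    have hwin2 := inv_remove _ _ _ hwin1
    simp only [List.append_eq] at hwin2
    have hnew : (arr.take (p + 1)).drop (p + 1 - kN)
        = ((arr.take p).drop (p - kN + 1)) ++ [arr[p]] := by
      rw [htake, List.drop_append_of_le_length (by simp; omega)]
      congr 2
      omega
    have hx : PySem.List.pyGetD arr ((p : Int) - (kN : Int)) 0 = arr[p - kN]'(by omega) := by
      have : (p : Int) - (kN : Int) = ((p - kN : Nat) : Int) := by omega
      rw [this, PySem.List.pyGetD_natCast, List.getD_eq_getElem _ _ (by omega)]
    have hcond : ((kN : Int) ≤ (p : Int)) := by exact_mod_cast hk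
    have hcond2 : ((kN : Int) - 1 ≤ (p : Int)) := by omega
    constructor
    · show InvD _ (dewStep arr (kN : Int) st (p : Int)).1
      unfold dewStep
      simp only [ha, hx, if_pos hcond, if_pos hcond2, hnew]
      exact hwin2
    · unfold dewStep
      simp only [ha, hx, if_pos hcond, if_pos hcond2, hres]
      have hr : p + 2 - kN = (p + 1 - kN) + 1 := by omega
      rw [hr, List.range_succ, List.map_append]
      congr 1
      simp only [List.map_cons, List.map_nil]
      congr 1
      have hsz := size_of_inv _ _ hwin2
      have hwe : List.drop (p + 1 - kN) (List.take (p + 1) arr)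
          = (arr.drop (p + 1 - kN)).take kN := by
        rw [List.drop_take]
        congr 1
        omega
      rw [← hnew, hwe] at hsz
      rw [hsz]
      rfl
  · -- window still growing: p + 1 ≤ kN, only the insert happens
    have h0 : p - kN = 0 := by omega
    have h0' : p + 1 - kN = 0 := by omega
    rw [h0, List.drop_zero] at hinv
    have hwin1 : InvD ((arr.take p) ++ [arr[p]])
        (st.1.insert arr[p] (st.1.getD arr[p] 0 + 1)) := inv_insert_add _ _ _ hinv
    rw [← htake] at hwin1
    have hcond : ¬ ((kN : Int) ≤ (p : Int)) := by exact_mod_cast hk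
    constructor
    · show InvD _ (dewStep arr (kN : Int) st (p : Int)).1
      unfold dewStep
      simp only [ha, if_neg hcond, h0', List.drop_zero]
      split <;> exact hwin1
    · unfold dewStep
      simp only [ha, if_neg hcond, hres]
      by_cases hfull : kN ≤ p + 1
      · have hkp : kN = p + 1 := by omega
        have hcond2 : ((kN : Int) - 1 ≤ (p : Int)) := by omega
        simp only [if_pos hcond2]
        have e1 : p + 1 - kN = 0 := by omega
        rw [e1]
        have e2 : p + 2 - kN = 1 := by omega
        rw [e2, List.range_one]
        simp only [List.range_zero, List.map_nil, List.nil_append, List.map_cons, List.map_nil]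
        congr 1
        have hsz := size_of_inv _ _ hwin1
        rw [hsz]
        unfold wcnt
        rw [List.drop_zero, hkp]
      · have hcond2 : ¬ ((kN : Int) - 1 ≤ (p : Int)) := by omega
        simp only [if_neg hcond2]
        have e1 : p + 2 - kN = 0 := by omega
        have e2 : p + 1 - kN = 0 := by omega
        rw [e1, e2]

lemma loop_inv (arr : List Int) (kN : Nat) (h1 : 1 ≤ kN) :
    ∀ p : Nat, p ≤ arr.length →
      InvD ((arr.take p).drop (p - kN))
        (((PySem.List.pyRange 0 (p : Int) 1).foldl (dewStep arr (kN : Int))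
          (PySem.Dict.empty, [])).1)
      ∧ (((PySem.List.pyRange 0 (p : Int) 1).foldl (dewStep arr (kN : Int))
          (PySem.Dict.empty, [])).2
        = (List.range (p + 1 - kN)).map (wcnt arr kN)) := by
  intro p
  induction p with
  | zero =>
    intro _
    rw [show ((0 : Nat) : Int) = 0 by norm_num, PySem.List.pyRange_one_eq_nil le_rfl]
    refine ⟨⟨PySem.Dict.nodup_keys_empty, ?_⟩, ?_⟩
    · intro x
      simp [PySem.Dict.get?_empty]
    · have : 0 + 1 - kN = 0 := by omega
      simp [this]
  | succ p ih =>
    intro hp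
    have IH := ih (by omega)
    have hcast : ((p + 1 : Nat) : Int) = (p : Int) + 1 := by push_cast; ring
    rw [hcast, PySem.List.pyRange_one_succ_right (by positivity), List.foldl_append,
      List.foldl_cons, List.foldl_nil]
    exact dewStep_spec arr kN p h1 (by omega) _ IH.1 IH.2

-- A as a map over window starts
lemma A_eq_map (arr : List Int) (k : Int) :
    distinct_elements_brute arr k =
      (PySem.List.pyRange 0 ((arr.length : Int) - k + 1) 1).map
        (fun i => ((PySem.Set.ofList ((PySem.List.pyRange i (i + k) 1).map
          (fun j => PySem.List.pyGetD arr j 0))).length : Int)) := by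
  unfold distinct_elements_brute
  simp only [← PySem.Set.update_map_eq_foldl_add]
  rw [PySem.List.foldl_append_singleton_eq_map]
  simp [PySem.Set.update_nil_left]

-- ===== VERDICT (by name: the statement is the Claim_ definition above) =====
theorem distinct_elements_brute_spec : Claim_equal_distinct_elements_brute := by
  intro arr k _
  unfold Spec_distinct_elements_brute
  simp only [distinct_elements_brute_alt]
  by_cases hm : (arr.length : Int) - k + 1 ≤ 0
  · rw [if_pos hm, A_eq_map, PySem.List.pyRange_one_eq_nil hm, List.map_nil]
  · rw [if_neg hm]
    by_cases hk : k ≤ 0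
    · rw [if_pos hk, A_eq_map]
      have hz : ∀ i ∈ PySem.List.pyRange 0 ((arr.length : Int) - k + 1) 1,
          ((PySem.Set.ofList ((PySem.List.pyRange i (i + k) 1).map
            (fun j => PySem.List.pyGetD arr j 0))).length : Int) = (fun _ : Int => (0 : Int)) i := by
        intro i _
        rw [PySem.List.pyRange_one_eq_nil (by omega), List.map_nil]
        rfl
      rw [List.map_congr_left hz, List.map_const', PySem.List.length_pyRange_one]
      congr 1
      omega
    · push_neg at hk
      obtain ⟨kN, rfl⟩ : ∃ kN : Nat, k = (kN : Int) := ⟨k.toNat, (Int.toNat_of_nonneg hk.le).symm⟩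
      have h1 : 1 ≤ kN := by exact_mod_cast hk
      have h2 : kN ≤ arr.length := by omega
      rw [if_neg (show ¬ ((kN : Int) ≤ 0) by omega)]
      have HL := loop_inv arr kN h1 arr.length le_rfl
      rw [A_eq_map, HL.2]
      have hcast : (arr.length : Int) - (kN : Int) + 1 = ((arr.length - kN + 1 : Nat) : Int) := by
        omega
      rw [hcast, PySem.List.pyRange_zero_nat, List.map_map]
      have hidx : arr.length + 1 - kN = arr.length - kN + 1 := by omega
      rw [hidx]
      apply List.map_congr_left
      intro i hi
      simp only [Function.comp_apply]
      rw [window_map arr kN i (by simp [List.mem_range] at hi; omega)]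
      rfl
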